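-- pv_equiv track=rewrite | github.com/njc1583/IdaVision | stage_2.py | get_processing_jobs
-- ===== SOURCE A (Python) =====
-- def get_processing_jobs(start_frame, end_frame, T_init):
--     F = end_frame - start_frame
--
--     processing_jobs = []
--
--     for f in range(F // T_init):
--         job = [start_frame + (T_init * f), start_frame + (T_init * (f+1))]
--
--         processing_jobs.append(job)
--
--     if len(processing_jobs) == 0:
--         processing_jobs = [[start_frame, end_frame]]
--     else:
--         processing_jobs[-1][-1] = end_frame
--
--     return processing_jobs
-- ===== SOURCE B (Python) =====
-- def get_processing_jobs(start_frame, end_frame, T_init):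
--     n = (end_frame - start_frame) // T_init
--     if n < 2:
--         return [[start_frame, end_frame]]
--     mid = start_frame + T_init * (n // 2)
--     return get_processing_jobs(start_frame, mid, T_init) + \
--            get_processing_jobs(mid, end_frame, T_init)
-- ===== Notes on version B (the rewrite author's own statement) =====
-- stated objective: alternative
-- what changed: Replaces A's sequential build-then-mutate-last loop with a divide-and-conquer recursion that splits the frame range at the middle interval boundary and concatenates the two halves' job lists, the last interval ending at end_frame via the base case instead of in-place mutation.
import Mathlib
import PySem

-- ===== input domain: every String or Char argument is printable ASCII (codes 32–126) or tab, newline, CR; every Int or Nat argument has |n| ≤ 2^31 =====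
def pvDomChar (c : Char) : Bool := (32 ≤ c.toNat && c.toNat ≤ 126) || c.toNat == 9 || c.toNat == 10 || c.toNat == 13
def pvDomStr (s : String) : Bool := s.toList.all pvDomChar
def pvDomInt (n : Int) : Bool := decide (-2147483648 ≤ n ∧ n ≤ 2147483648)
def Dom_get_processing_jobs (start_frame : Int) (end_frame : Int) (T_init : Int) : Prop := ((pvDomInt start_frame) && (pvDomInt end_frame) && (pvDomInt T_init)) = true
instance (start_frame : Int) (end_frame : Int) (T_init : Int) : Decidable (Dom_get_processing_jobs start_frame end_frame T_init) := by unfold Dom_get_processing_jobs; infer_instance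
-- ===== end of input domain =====

-- B replaces A's sequential build-then-mutate-last loop by a divide-and-conquer recursion
-- that splits the frame range at the middle interval boundary ("alternative").

-- ===== PORT A =====
def get_processing_jobs (start_frame : Int) (end_frame : Int) (T_init : Int) : List (List Int) :=
  let F := end_frame - start_frame
  let processing_jobs :=
    (PySem.List.pyRange 0 (PySem.Int.floordiv F T_init) 1).foldl
      (fun acc f => acc ++ [[start_frame + T_init * f, start_frame + T_init * (f + 1)]]) []
  if processing_jobs.length = 0 then
    [[start_frame, end_frame]]
  else
    -- processing_jobs[-1][-1] = end_frame
    PySem.List.pySetD processing_jobs (-1)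
      (PySem.List.pySetD (PySem.List.pyGetD processing_jobs (-1) []) (-1) end_frame)

-- ===== PORT B =====
-- termination helper, cited by decreasing_by: the left/right subranges hold strictly
-- fewer whole intervals than the original range
theorem pv_fdiv_sub (a T k : Int) (hT : T ≠ 0) :
    PySem.Int.floordiv (a - T * k) T = PySem.Int.floordiv a T - k := by
  show Int.fdiv (a - T * k) T = Int.fdiv a T - k
  have := Int.add_mul_fdiv_right a (-k) hT
  have he : a + -k * T = a - T * k := by ring
  rw [he] at this
  omega

theorem pv_fdiv_mul (T k : Int) (hT : T ≠ 0) :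
    PySem.Int.floordiv (T * k) T = k := by
  have := pv_fdiv_sub 0 T (-k) hT
  simp only [zero_sub, mul_neg, neg_neg] at this
  have h0 : PySem.Int.floordiv 0 T = 0 := by
    show Int.fdiv 0 T = 0; exact Int.zero_fdiv T
  omega

theorem pv_T_ne_zero {a T : Int} (h : ¬ PySem.Int.floordiv a T < 2) : T ≠ 0 := by
  intro h0
  apply h
  subst h0
  show Int.fdiv a 0 < 2
  simp [Int.fdiv_zero]

theorem pv_half_bounds {n : Int} (h : ¬ n < 2) :
    1 ≤ PySem.Int.floordiv n 2 ∧ PySem.Int.floordiv n 2 ≤ n - 1 := by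
  have hfd : Int.fdiv n 2 = n / 2 := by
    rw [Int.fdiv_eq_ediv]; simp
  show 1 ≤ Int.fdiv n 2 ∧ Int.fdiv n 2 ≤ n - 1
  rw [hfd]
  omega

def get_processing_jobs_alt (start_frame : Int) (end_frame : Int) (T_init : Int) : List (List Int) :=
  let n := PySem.Int.floordiv (end_frame - start_frame) T_init
  if h : n < 2 then
    [[start_frame, end_frame]]
  else
    let mid := start_frame + T_init * PySem.Int.floordiv n 2
    get_processing_jobs_alt start_frame mid T_init ++
      get_processing_jobs_alt mid end_frame T_init
termination_by (PySem.Int.floordiv (end_frame - start_frame) T_init).toNat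
decreasing_by
  · simp only [n] at h ⊢
    have hT := pv_T_ne_zero h
    have hb := pv_half_bounds h
    have : start_frame + T_init * PySem.Int.floordiv (PySem.Int.floordiv (end_frame - start_frame) T_init) 2 - start_frame
        = T_init * PySem.Int.floordiv (PySem.Int.floordiv (end_frame - start_frame) T_init) 2 := by ring
    rw [this, pv_fdiv_mul _ _ hT]
    omega
  · simp only [n] at h ⊢
    have hT := pv_T_ne_zero h
    have hb := pv_half_bounds h
    have : end_frame - (start_frame + T_init * PySem.Int.floordiv (PySem.Int.floordiv (end_frame - start_frame) T_init) 2)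
        = (end_frame - start_frame) - T_init * PySem.Int.floordiv (PySem.Int.floordiv (end_frame - start_frame) T_init) 2 := by ring
    rw [this, pv_fdiv_sub _ _ _ hT]
    omega

-- ===== PRECONDITION & SPEC =====
-- Python A raises ZeroDivisionError exactly when T_init = 0; otherwise it returns.
def Pre_get_processing_jobs (start_frame : Int) (end_frame : Int) (T_init : Int) : Prop :=
  T_init ≠ 0
instance (start_frame : Int) (end_frame : Int) (T_init : Int) : Decidable (Pre_get_processing_jobs start_frame end_frame T_init) := by unfold Pre_get_processing_jobs; infer_instance

def pvWitness_get_processing_jobs : Int × Int × Int := (0, 10, 3)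

def Spec_get_processing_jobs (start_frame : Int) (end_frame : Int) (T_init : Int) (out : List (List Int)) : Prop := out = get_processing_jobs_alt start_frame end_frame T_init
instance (start_frame : Int) (end_frame : Int) (T_init : Int) (out : List (List Int)) : Decidable (Spec_get_processing_jobs start_frame end_frame T_init out) := by unfold Spec_get_processing_jobs; infer_instance

-- ===== CLAIM (what is proved, stated in full; the proofs are below) =====
def Claim_equal_get_processing_jobs : Prop := ∀ (start_frame : Int) (end_frame : Int) (T_init : Int), Dom_get_processing_jobs start_frame end_frame T_init → Pre_get_processing_jobs start_frame end_frame T_init → Spec_get_processing_jobs start_frame end_frame T_init (get_processing_jobs start_frame end_frame T_init)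

-- ===== LEMMAS AND PROOFS =====

-- helper: setting the last element of a nonempty list
theorem set_last {α : Type} (xs : List α) (v : α) (h : xs ≠ []) :
    xs.set (xs.length - 1) v = xs.dropLast ++ [v] := by
  induction xs with
  | nil => simp at h
  | cons a t ih =>
    cases t with
    | nil => simp
    | cons b u =>
      have ht : (b :: u) ≠ [] := by simp
      have : (a :: b :: u).length - 1 = ((b :: u).length - 1) + 1 := by
        simp [List.length_cons]
      rw [this, List.set_cons_succ, ih ht]
      simp

-- pySetD at index -1 on a nonempty list replaces the last element
theorem pySetD_neg_one' {α : Type} (xs : List α) (v : α) (h : xs ≠ []) :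
    PySem.List.pySetD xs (-1) v = xs.dropLast ++ [v] := by
  have hlen : 0 < xs.length := List.length_pos_iff.mpr h
  have hidx : PySem.List.pyIdx? xs.length (-1) = some (xs.length - 1) := by
    simp [PySem.List.pyIdx?]
    omega
  simp [PySem.List.pySetD, PySem.List.pySet?, hidx, set_last xs v h]

-- closed form of port A when F // T_init = m + 1
theorem A_closed (s e T : Int) (m : Nat)
    (h : PySem.Int.floordiv (e - s) T = (m : Int) + 1) :
    get_processing_jobs s e T =
      (List.range m).map (fun k : Nat => [s + T * (k : Int), s + T * ((k : Int) + 1)])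
        ++ [[s + T * (m : Int), e]] := by
  unfold get_processing_jobs
  dsimp only
  rw [h, PySem.List.pyRange_one]
  have hm : ((m : Int) + 1 - 0).toNat = m + 1 := by omega
  rw [hm, PySem.List.foldl_append_singleton_eq_map]
  simp only [List.map_map, Function.comp_def, zero_add, List.nil_append]
  rw [if_neg (by simp)]
  rw [List.range_succ, List.map_append]
  simp only [List.map_cons, List.map_nil]
  rw [PySem.List.pyGetD_neg_one_append_singleton]
  rw [pySetD_neg_one' _ _ (by simp), pySetD_neg_one' _ _ (by simp)]
  simp

-- closed form of port B when F // T_init = m + 1, by strong induction on m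
theorem B_closed (m : Nat) : ∀ (s e T : Int),
    PySem.Int.floordiv (e - s) T = (m : Int) + 1 →
    get_processing_jobs_alt s e T =
      (List.range m).map (fun k : Nat => [s + T * (k : Int), s + T * ((k : Int) + 1)])
        ++ [[s + T * (m : Int), e]] := by
  induction m using Nat.strong_induction_on with
  | _ m ih =>
    intro s e T h
    rcases Nat.eq_zero_or_pos m with hm0 | hmpos
    · subst hm0
      rw [get_processing_jobs_alt]
      simp only [h]
      rw [dif_pos (by norm_num)]
      simp
    · have hn2 : ¬ PySem.Int.floordiv (e - s) T < 2 := by omega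
      have hT : T ≠ 0 := pv_T_ne_zero hn2
      rw [get_processing_jobs_alt]
      simp only [h]
      rw [dif_neg (by omega)]
      set k : Int := PySem.Int.floordiv ((m : Int) + 1) 2 with hk
      have hb : 1 ≤ k ∧ k ≤ (m : Int) := by
        have := pv_half_bounds (n := (m : Int) + 1) (by omega)
        omega
      set kn : Nat := k.toNat with hkn
      have hkeq : k = (kn : Int) := by omega
      have hkn1 : 1 ≤ kn := by omega
      have hknm : kn ≤ m := by omega
      set mid : Int := s + T * k with hmid
      -- left subcall: mid - s = T * k, so its count is k = (kn-1)+1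
      have hleft : PySem.Int.floordiv (mid - s) T = ((kn - 1 : Nat) : Int) + 1 := by
        have : mid - s = T * k := by rw [hmid]; ring
        rw [this, pv_fdiv_mul _ _ hT]
        omega
      -- right subcall: its count is (m+1) - k = ((m-kn):Nat) + 1
      have hright : PySem.Int.floordiv (e - mid) T = ((m - kn : Nat) : Int) + 1 := by
        have : e - mid = (e - s) - T * k := by rw [hmid]; ring
        rw [this, pv_fdiv_sub _ _ _ hT, h]
        omega
      rw [ih (kn - 1) (by omega) s mid T hleft,
          ih (m - kn) (by omega) mid e T hright]
      -- glue: left's clamped last interval is exactly interval kn-1, then shift indices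
      have hlast : ([[s + T * ((kn - 1 : Nat) : Int), mid]] : List (List Int))
          = [[s + T * ((kn - 1 : Nat) : Int), s + T * (((kn - 1 : Nat) : Int) + 1)]] := by
        rw [hmid, hkeq]
        have : (((kn - 1 : Nat) : Int)) + 1 = (kn : Int) := by omega
        rw [this]
      rw [hlast]
      have hleftpack :
          (List.range (kn - 1)).map (fun j : Nat => [s + T * (j : Int), s + T * ((j : Int) + 1)])
            ++ [[s + T * ((kn - 1 : Nat) : Int), s + T * (((kn - 1 : Nat) : Int) + 1)]]
          = (List.range kn).map (fun j : Nat => [s + T * (j : Int), s + T * ((j : Int) + 1)]) := by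
        have : kn = (kn - 1) + 1 := by omega
        rw [this, List.range_succ, List.map_append]
        simp
      rw [← List.append_assoc, hleftpack]
      have hglue :
          (List.range kn).map (fun j : Nat => [s + T * (j : Int), s + T * ((j : Int) + 1)])
            ++ (List.range (m - kn)).map (fun j : Nat => [mid + T * (j : Int), mid + T * ((j : Int) + 1)])
          = (List.range m).map (fun j : Nat => [s + T * (j : Int), s + T * ((j : Int) + 1)]) := by
        have hrange : List.range m
            = List.range kn ++ (List.range (m - kn)).map (fun j => kn + j) := by
          have hmspl : m = kn + (m - kn) := by omega
          conv_lhs => rw [hmspl]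
          exact List.range_add
        rw [hrange, List.map_append, List.map_map]
        congr 1
        apply List.map_congr_left
        intro j _
        simp only [Function.comp_apply, hmid, hkeq, List.cons.injEq, and_true]
        push_cast
        exact ⟨by ring, by ring⟩
      have hend : mid + T * ((m - kn : Nat) : Int) = s + T * (m : Int) := by
        rw [hmid, hkeq]
        have : ((m - kn : Nat) : Int) = (m : Int) - (kn : Int) := by omega
        rw [this]; ring
      rw [hglue, hend]

theorem main_lemma (s e T : Int) (_hT : T ≠ 0) :
    get_processing_jobs s e T = get_processing_jobs_alt s e T := by
  by_cases hpos : 0 < PySem.Int.floordiv (e - s) T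
  · obtain ⟨m, hm⟩ : ∃ m : Nat, PySem.Int.floordiv (e - s) T = (m : Int) + 1 :=
      ⟨(PySem.Int.floordiv (e - s) T - 1).toNat, by omega⟩
    rw [A_closed s e T m hm, B_closed m s e T hm]
  · have hnil : PySem.List.pyRange 0 (PySem.Int.floordiv (e - s) T) 1 = [] :=
      PySem.List.pyRange_one_eq_nil (by omega)
    rw [get_processing_jobs_alt]
    unfold get_processing_jobs
    simp [hnil]
    omega

-- ===== VERDICT (by name: the statement is the Claim_ definition above) =====
theorem get_processing_jobs_spec : Claim_equal_get_processing_jobs := by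
  intro s e T _ hT
  exact main_lemma s e T hT
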